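-- pv_equiv track=rewrite | github.com/miliar/Code_Jam_Webscraper | solutions_python/Problem_201/2007.py | get_best_pos
-- ===== SOURCE A (Python) =====
-- def empty_on_left(stalls, i):
--   count = 0
--   while True:
--     if i == 0:
--       return count
--     elif stalls[i-1] == 0:
--       count += 1
--       i -= 1
--     else:
--       return count
--
-- def empty_on_right(stalls, i):
--   count = 0
--   while True:
--     if i == len(stalls)-1:
--       return count
--     elif stalls[i+1] == 0:
--       count += 1
--       i += 1
--     else:
--       return count
--
-- def get_best_pos(stalls):
--   best_pos = 0
--   best_min = 0
--   best_max = 0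
--   for i in range(1, len(stalls)-1):
--     if stalls[i] == 1:
--       continue
--     else:
--       L = empty_on_left(stalls, i)
--       R = empty_on_right(stalls, i)
--       if min(L, R) > best_min:    #if the cur pos has better min
--         best_pos = i                #we've found a new best
--         best_min = min(L, R)
--         best_max = max(L, R)
--       elif min(L, R) == best_min: #if the cur pos has equal min
--         if max(L, R) > best_max:  #look at the max, if it's better
--           best_pos = i              #we've found a new best
--           best_min = min(L, R)
--           best_max = max(L, R)
--         #if the min and the max are equal, we choose the leftmost pos,
--         #which is the one we already have, since we're iterating from
--         #left to right
--   return best_pos, best_min, best_max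
-- ===== SOURCE B (Python) =====
-- def get_best_pos(stalls):
--     # precompute runs of consecutive empty stalls in two linear scans,
--     # then pick the best position in one pass.
--     left = []
--     run = 0
--     for v in stalls:
--         left.append(run)
--         run = run + 1 if v == 0 else 0
--     right = []
--     run = 0
--     for v in reversed(stalls):
--         right.append(run)
--         run = run + 1 if v == 0 else 0
--     right.reverse()
--     best_pos, best_min, best_max = 0, 0, 0
--     for i in range(1, len(stalls) - 1):
--         if stalls[i] == 1:
--             continue
--         lo, hi = min(left[i], right[i]), max(left[i], right[i])
--         if lo > best_min or (lo == best_min and hi > best_max):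
--             best_pos, best_min, best_max = i, lo, hi
--     return best_pos, best_min, best_max
-- ===== Notes on version B (the rewrite author's own statement) =====
-- stated objective: alternative
-- what changed: Replaced the per-position left/right rescans with two linear passes that precompute the consecutive-empty run before and after each stall, then a single scan picks the best position.
import Mathlib
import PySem

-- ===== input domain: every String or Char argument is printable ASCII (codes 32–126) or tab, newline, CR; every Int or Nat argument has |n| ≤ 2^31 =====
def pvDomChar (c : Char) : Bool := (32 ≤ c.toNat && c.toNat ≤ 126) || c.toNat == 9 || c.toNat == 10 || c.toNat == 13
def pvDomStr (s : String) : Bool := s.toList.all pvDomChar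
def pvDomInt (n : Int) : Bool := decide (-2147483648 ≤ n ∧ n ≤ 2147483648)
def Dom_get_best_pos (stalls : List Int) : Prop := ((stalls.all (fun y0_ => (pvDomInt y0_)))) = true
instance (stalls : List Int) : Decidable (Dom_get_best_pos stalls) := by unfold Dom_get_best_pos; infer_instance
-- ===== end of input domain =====

-- B replaces A's per-position rescans by two linear passes precomputing the empty-run lengths, then one scan.

-- ===== PORT A =====
-- empty_on_left: while-loop decreasing i, carrying count; all stalls indices are in range, so getD is exact.
def emptyOnLeft (stalls : List Int) : Nat → Int → Int
  | 0, count => count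
  | i+1, count =>
      if stalls.getD i 0 == 0 then emptyOnLeft stalls i (count + 1) else count

-- empty_on_right: while-loop increasing i until len-1; fuel = (len-1) - i counts the remaining steps.
def emptyOnRightAux (stalls : List Int) : Nat → Nat → Int → Int
  | 0, _, count => count
  | k+1, i, count =>
      if stalls.getD (i+1) 0 == 0 then emptyOnRightAux stalls k (i+1) (count + 1) else count

def emptyOnRight (stalls : List Int) (i : Nat) : Int :=
  emptyOnRightAux stalls (stalls.length - 1 - i) i 0

def get_best_pos (stalls : List Int) : Int × Int × Int :=
  (List.range' 1 (stalls.length - 2)).foldl (fun b i =>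
    if stalls.getD i 0 == 1 then b
    else
      let L := emptyOnLeft stalls i 0
      let R := emptyOnRight stalls i
      if min L R > b.2.1 then ((i : Int), min L R, max L R)
      else if min L R == b.2.1 then
        (if max L R > b.2.2 then ((i : Int), min L R, max L R) else b)
      else b) (0, 0, 0)

-- ===== PORT B =====
-- forward scan carrying the current run of empty stalls (the python append loop)
def buildRuns (stalls : List Int) (run : Int) : List Int :=
  match stalls with
  | [] => []
  | v :: rest => run :: buildRuns rest (if v == 0 then run + 1 else 0)

def get_best_pos_alt (stalls : List Int) : Int × Int × Int :=
  let left := buildRuns stalls 0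
  let right := (buildRuns stalls.reverse 0).reverse
  (List.range' 1 (stalls.length - 2)).foldl (fun b i =>
    if stalls.getD i 0 == 1 then b
    else
      let lo := min (left.getD i 0) (right.getD i 0)
      let hi := max (left.getD i 0) (right.getD i 0)
      if lo > b.2.1 ∨ (lo == b.2.1 ∧ hi > b.2.2) then ((i : Int), lo, hi) else b) (0, 0, 0)

-- ===== PRECONDITION & SPEC =====
def Spec_get_best_pos (stalls : List Int) (out : Int × Int × Int) : Prop := out = get_best_pos_alt stalls
instance (stalls : List Int) (out : Int × Int × Int) : Decidable (Spec_get_best_pos stalls out) := by unfold Spec_get_best_pos; infer_instance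

-- ===== CLAIM (what is proved, stated in full; the proofs are below) =====
def Claim_equal_get_best_pos : Prop := ∀ (stalls : List Int), Dom_get_best_pos stalls → Spec_get_best_pos stalls (get_best_pos stalls)

-- ===== LEMMAS AND PROOFS =====

theorem emptyOnLeft_acc (stalls : List Int) (i : Nat) (c : Int) :
    emptyOnLeft stalls i c = emptyOnLeft stalls i 0 + c := by
  induction i generalizing c with
  | zero => simp [emptyOnLeft]
  | succ n ih =>
    simp only [emptyOnLeft]
    split
    · rw [ih (c+1), ih (0+1)]; ring
    · simp

theorem emptyOnRightAux_acc (stalls : List Int) (k : Nat) (i : Nat) (c : Int) :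
    emptyOnRightAux stalls k i c = emptyOnRightAux stalls k i 0 + c := by
  induction k generalizing i c with
  | zero => simp [emptyOnRightAux]
  | succ n ih =>
    simp only [emptyOnRightAux]
    split
    · rw [ih _ (c+1), ih _ (0+1)]; ring
    · simp

theorem buildRuns_length (stalls : List Int) (run : Int) :
    (buildRuns stalls run).length = stalls.length := by
  induction stalls generalizing run with
  | nil => rfl
  | cons v rest ih => simp [buildRuns, ih]

-- recurrence satisfied by the forward run scan
theorem buildRuns_getD_succ (stalls : List Int) (run : Int) (i : Nat) (h : i + 1 < stalls.length) :
    (buildRuns stalls run).getD (i+1) 0 =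
      if stalls.getD i 0 == 0 then (buildRuns stalls run).getD i 0 + 1 else 0 := by
  induction stalls generalizing run i with
  | nil => simp at h
  | cons v rest ih =>
    cases i with
    | zero =>
      rcases rest with _ | ⟨w, rest'⟩
      · simp at h
      · simp only [buildRuns, List.getD_cons_succ, List.getD_cons_zero]
    | succ j =>
      have hj : j + 1 < rest.length := by simpa using h
      simpa [buildRuns, List.getD_cons_succ] using ih (if v == 0 then run + 1 else 0) j hj

theorem buildRuns_getD_zero (stalls : List Int) (run : Int) :
    (buildRuns stalls run).getD 0 0 = if stalls = [] then 0 else run := by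
  cases stalls <;> simp [buildRuns]

-- left[i] equals empty_on_left(stalls, i)
theorem left_eq_eol (stalls : List Int) (i : Nat) (h : i < stalls.length) :
    (buildRuns stalls 0).getD i 0 = emptyOnLeft stalls i 0 := by
  induction i with
  | zero =>
    rw [buildRuns_getD_zero]
    cases stalls <;> simp [emptyOnLeft]
  | succ j ih =>
    have hj : j < stalls.length := Nat.lt_of_succ_lt h
    rw [buildRuns_getD_succ stalls 0 j h]
    simp only [emptyOnLeft]
    split
    · rw [emptyOnLeft_acc, ih hj]; ring
    · rfl

-- reversed-scan value at fuel k equals empty_on_left on the reversed list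
theorem eorAux_eq_eol_rev (stalls : List Int) (k : Nat) (hk : k + 1 ≤ stalls.length) :
    emptyOnRightAux stalls k (stalls.length - 1 - k) 0 = emptyOnLeft stalls.reverse k 0 := by
  induction k with
  | zero => rfl
  | succ j ih =>
    have hlen : stalls.length - 1 - (j+1) + 1 = stalls.length - 1 - j := by omega
    have hidx : stalls.length - 1 - j < stalls.length := by omega
    have hrev : stalls.reverse.getD j 0 = stalls.getD (stalls.length - 1 - j) 0 := by
      have h1 : j < stalls.reverse.length := by simp; omega
      rw [List.getD_eq_getElem _ _ h1, List.getD_eq_getElem _ _ hidx]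
      rw [List.getElem_reverse]
    simp only [emptyOnRightAux, emptyOnLeft, hlen, hrev]
    split
    all_goals first
      | (rw [emptyOnRightAux_acc, emptyOnLeft_acc, ih (by omega)])
      | rfl

-- right[i] equals empty_on_right(stalls, i)
theorem right_eq_eor (stalls : List Int) (i : Nat) (h : i < stalls.length) :
    ((buildRuns stalls.reverse 0).reverse).getD i 0 = emptyOnRight stalls i := by
  have hlen : (buildRuns stalls.reverse 0).length = stalls.length := by
    rw [buildRuns_length]; simp
  have h1 : i < ((buildRuns stalls.reverse 0).reverse).length := by simp [hlen]; omega
  have h2 : (buildRuns stalls.reverse 0).length - 1 - i < (buildRuns stalls.reverse 0).length := by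
    omega
  rw [List.getD_eq_getElem _ _ h1, List.getElem_reverse, ← List.getD_eq_getElem _ 0 h2]
  have hk : stalls.length - 1 - i < stalls.length := by omega
  rw [hlen, left_eq_eol stalls.reverse (stalls.length - 1 - i) (by simp; omega)]
  rw [emptyOnRight]
  have : stalls.length - 1 - (stalls.length - 1 - i) = i := by omega
  rw [← eorAux_eq_eol_rev stalls (stalls.length - 1 - i) (by omega), this]

-- ===== VERDICT (by name: the statement is the Claim_ definition above) =====
theorem branch_eq (bp bmin bmax L R i : Int) :
    (if min L R > bmin then (i, min L R, max L R)
     else if min L R == bmin then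
       (if max L R > bmax then (i, min L R, max L R) else ((bp, bmin, bmax) : Int × Int × Int))
     else (bp, bmin, bmax))
    = (if min L R > bmin ∨ (min L R == bmin ∧ max L R > bmax) then ((i, min L R, max L R) : Int × Int × Int)
       else (bp, bmin, bmax)) := by
  simp only [beq_iff_eq, gt_iff_lt]
  split_ifs <;> first | rfl | (exfalso; omega)

-- ===== VERDICT (by name: the statement is the Claim_ definition above) =====
theorem get_best_pos_spec : Claim_equal_get_best_pos := by
  intro stalls _
  unfold Spec_get_best_pos get_best_pos get_best_pos_alt
  apply PySem.List.foldl_congr_mem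
  intro b i hi
  have hmem := List.mem_range'.mp hi
  have hin : i < stalls.length := by omega
  simp only [left_eq_eol stalls i hin, right_eq_eor stalls i hin]
  rcases b with ⟨bp, bmin, bmax⟩
  split
  · rfl
  · exact branch_eq bp bmin bmax (emptyOnLeft stalls i 0) (emptyOnRight stalls i) (i : Int)
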